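-- pv_equiv track=rewrite | github.com/Marshmallow703/job-tracker-2026spring | src/fetch_ashby.py | _location_ok
-- ===== SOURCE A (Python) =====
-- def _location_ok(location: str, rules: dict) -> bool:
--     if not location:
--         return True
--     loc = location.lower()
--     for ex in rules.get("location_exclude_strict", []):
--         if ex.lower() in loc:
--             for inc in rules.get("location_include", []):
--                 if inc.lower() in loc:
--                     return True
--             return False
--     for inc in rules.get("location_include", []):
--         if inc.lower() in loc:
--             return True
--     return True
-- ===== SOURCE B (Python) =====
-- def _location_ok(location: str, rules: dict) -> bool:
--     if not location:
--         return True
--     loc = location.lower()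
--     tagged = [(False, p) for p in rules.get("location_exclude_strict", [])] \
--            + [(True, p) for p in rules.get("location_include", [])]
--     exc_hit = inc_hit = False
--     for is_inc, pat in tagged:
--         if pat.lower() in loc:
--             if is_inc:
--                 inc_hit = True
--             else:
--                 exc_hit = True
--     return inc_hit or not exc_hit
-- ===== Notes on version B (the rewrite author's own statement) =====
-- stated objective: alternative
-- what changed: Replaces A's nested early-return exclude->include loops (plus a dead trailing include loop) with one exhaustive pass over a tagged merge of both rule lists that accumulates two hit flags, combined at the end by a single boolean formula inc_hit or not exc_hit.
import Mathlib
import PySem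

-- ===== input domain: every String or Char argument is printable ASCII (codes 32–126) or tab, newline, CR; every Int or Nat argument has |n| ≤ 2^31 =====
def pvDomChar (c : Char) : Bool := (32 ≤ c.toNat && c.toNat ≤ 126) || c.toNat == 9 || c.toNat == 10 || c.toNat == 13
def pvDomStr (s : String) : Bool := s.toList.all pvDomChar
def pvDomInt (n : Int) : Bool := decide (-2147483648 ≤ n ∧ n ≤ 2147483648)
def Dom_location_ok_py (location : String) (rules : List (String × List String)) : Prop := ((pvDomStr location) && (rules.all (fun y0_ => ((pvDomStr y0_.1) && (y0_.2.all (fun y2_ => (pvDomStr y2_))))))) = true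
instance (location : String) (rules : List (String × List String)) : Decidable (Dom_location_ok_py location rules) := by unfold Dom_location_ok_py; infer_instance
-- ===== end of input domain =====

-- B: one exhaustive pass over a tagged merge of both rule lists with two accumulator flags,
-- instead of A's nested early-return loops; 'alternative' objective, return value only.

-- ===== PORT A =====

-- rules.get(key, []): dict as association list, lookup = first match
def pvGetD (rules : List (String × List String)) (k : String) : List String :=
  match rules.find? (fun p => p.1 == k) with
  | some p => p.2
  | none => []

-- inner 'for inc in …: if inc.lower() in loc: return True / return False'
def pvAInner (loc : String) : List String → Bool
  | [] => false
  | inc :: rest =>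
    if PySem.Str.isIn (PySem.Str.lower inc) loc then true else pvAInner loc rest

-- trailing 'for inc in …: if inc.lower() in loc: return True / return True'
def pvATrail (loc : String) : List String → Bool
  | [] => true
  | inc :: rest =>
    if PySem.Str.isIn (PySem.Str.lower inc) loc then true else pvATrail loc rest

-- outer 'for ex in …' loop
def pvAOuter (loc : String) (incl : List String) : List String → Bool
  | [] => pvATrail loc incl
  | ex :: rest =>
    if PySem.Str.isIn (PySem.Str.lower ex) loc then pvAInner loc incl
    else pvAOuter loc incl rest

def location_ok_py (location : String) (rules : List (String × List String)) : Bool :=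
  if location == "" then true
  else
    let loc := PySem.Str.lower location
    pvAOuter loc (pvGetD rules "location_include") (pvGetD rules "location_exclude_strict")

-- ===== PORT B =====

-- one step of B's loop: update (exc_hit, inc_hit) for a tagged pattern
def pvBStep (loc : String) (st : Bool × Bool) (p : Bool × String) : Bool × Bool :=
  if PySem.Str.isIn (PySem.Str.lower p.2) loc then
    if p.1 then (st.1, true) else (true, st.2)
  else st

def location_ok_py_alt (location : String) (rules : List (String × List String)) : Bool :=
  if location == "" then true
  else
    let loc := PySem.Str.lower location
    let tagged :=
      (pvGetD rules "location_exclude_strict").map (fun p => (false, p)) ++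
      (pvGetD rules "location_include").map (fun p => (true, p))
    let st := tagged.foldl (pvBStep loc) (false, false)
    st.2 || !st.1

-- ===== PRECONDITION & SPEC =====
def Spec_location_ok_py (location : String) (rules : List (String × List String)) (out : Bool) : Prop := out = location_ok_py_alt location rules
instance (location : String) (rules : List (String × List String)) (out : Bool) : Decidable (Spec_location_ok_py location rules out) := by unfold Spec_location_ok_py; infer_instance

-- ===== CLAIM (what is proved, stated in full; the proofs are below) =====
def Claim_equal_location_ok_py : Prop := ∀ (location : String) (rules : List (String × List String)), Dom_location_ok_py location rules → Spec_location_ok_py location rules (location_ok_py location rules)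

-- ===== LEMMAS AND PROOFS =====

theorem pvBStep_false (loc : String) (l : List String) (st : Bool × Bool) :
    (l.map (fun p => (false, p))).foldl (pvBStep loc) st =
      (st.1 || l.any (fun ex => PySem.Str.isIn (PySem.Str.lower ex) loc), st.2) := by
  induction l generalizing st with
  | nil => simp
  | cons a t ih =>
    simp only [List.map_cons, List.foldl_cons, List.any_cons, pvBStep, ih]
    cases PySem.Str.isIn (PySem.Str.lower a) loc <;> simp

theorem pvBStep_true (loc : String) (l : List String) (st : Bool × Bool) :
    (l.map (fun p => (true, p))).foldl (pvBStep loc) st =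
      (st.1, st.2 || l.any (fun inc => PySem.Str.isIn (PySem.Str.lower inc) loc)) := by
  induction l generalizing st with
  | nil => simp
  | cons a t ih =>
    simp only [List.map_cons, List.foldl_cons, List.any_cons, pvBStep, ih]
    cases PySem.Str.isIn (PySem.Str.lower a) loc <;> simp

theorem pvATrail_eq_true (loc : String) (l : List String) : pvATrail loc l = true := by
  induction l with
  | nil => rfl
  | cons a t ih => simp [pvATrail, ih]

theorem pvAInner_eq_any (loc : String) (l : List String) :
    pvAInner loc l = l.any (fun inc => PySem.Str.isIn (PySem.Str.lower inc) loc) := by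
  induction l with
  | nil => rfl
  | cons a t ih =>
    simp only [pvAInner, List.any_cons, ih]
    cases PySem.Str.isIn (PySem.Str.lower a) loc <;> simp

theorem pvAOuter_eq (loc : String) (incl excl : List String) :
    pvAOuter loc incl excl =
      (!(excl.any (fun ex => PySem.Str.isIn (PySem.Str.lower ex) loc)) ||
        incl.any (fun inc => PySem.Str.isIn (PySem.Str.lower inc) loc)) := by
  induction excl with
  | nil => simp [pvAOuter, pvATrail_eq_true]
  | cons a t ih =>
    simp only [pvAOuter, List.any_cons]
    cases PySem.Str.isIn (PySem.Str.lower a) loc <;>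
      simp [ih, pvAInner_eq_any]

-- ===== VERDICT =====
theorem location_ok_py_spec : Claim_equal_location_ok_py := by
  intro location rules _
  unfold Spec_location_ok_py location_ok_py location_ok_py_alt
  by_cases h : location == ""
  · simp [h]
  · simp only [h, Bool.false_eq_true, ite_false, List.foldl_append,
      pvBStep_false, pvBStep_true]
    rw [pvAOuter_eq]
    simp [Bool.or_comm]
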